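-- pv_equiv track=rewrite | github.com/nuodb/nuodb-python | pynuodb/datatype.py | _packtime
-- ===== SOURCE A (Python) =====
-- def _packtime(seconds, microseconds):
--     # type: (int, int) -> Tuple[int,int]
--     if microseconds:
--         ndiv = 0
--         shiftr = 1000000
--         shiftl = 1
--         while (microseconds % shiftr):
--             shiftr //= 10
--             shiftl *= 10
--             ndiv += 1
--         return (seconds * shiftl + microseconds // shiftr, ndiv)
--     else:
--         return (seconds, 0)
-- ===== SOURCE B (Python) =====
-- def _packtime(seconds, microseconds):
--     # type: (int, int) -> Tuple[int,int]
--     if not microseconds: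
--         return (seconds, 0)
--     digits = str(abs(microseconds))
--     z = min(6, len(digits) - len(digits.rstrip('0')))
--     ndiv = 6 - z
--     return (seconds * 10 ** ndiv + microseconds // 10 ** z, ndiv)
-- ===== Notes on version B (the rewrite author's own statement) =====
-- stated objective: alternative
-- what changed: Replaces A's arithmetic while loop over a descending divisor (mutating shiftr/shiftl/ndiv, one modulo test per step) by a digit-string computation: format |microseconds| in decimal, read the trailing-zero count off the string with rstrip('0'), cap it at 6, and produce the pair in closed form.
import Mathlib
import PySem

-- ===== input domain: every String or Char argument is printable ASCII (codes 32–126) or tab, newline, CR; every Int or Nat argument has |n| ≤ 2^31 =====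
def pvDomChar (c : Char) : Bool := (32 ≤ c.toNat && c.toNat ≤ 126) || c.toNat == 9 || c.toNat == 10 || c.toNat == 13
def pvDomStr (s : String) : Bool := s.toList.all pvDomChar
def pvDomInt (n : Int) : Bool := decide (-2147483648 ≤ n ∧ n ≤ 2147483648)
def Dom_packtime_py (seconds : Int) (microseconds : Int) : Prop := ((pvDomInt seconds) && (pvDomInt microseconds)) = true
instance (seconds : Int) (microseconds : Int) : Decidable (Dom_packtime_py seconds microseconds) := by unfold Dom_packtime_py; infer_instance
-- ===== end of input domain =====

-- B replaces A's arithmetic divide-by-ten while loop by a decimal digit-string computation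
-- (format |microseconds|, count trailing '0's via rstrip('0'), cap at 6, closed-form result); same behaviour, same cost.

-- ===== PORT A =====
-- the while loop: state (ndiv, shiftr, shiftl); 6 iterations always suffice (after 6 steps shiftr = 1 and m % 1 = 0)
def packtimeLoop (microseconds : Int) : Nat → Int × Int × Int → Int × Int × Int
  | 0, st => st
  | fuel+1, (ndiv, shiftr, shiftl) =>
    if PySem.Int.mod microseconds shiftr ≠ 0 then
      packtimeLoop microseconds fuel (ndiv + 1, PySem.Int.floordiv shiftr 10, shiftl * 10)
    else (ndiv, shiftr, shiftl)

def packtime_py (seconds : Int) (microseconds : Int) : Int × Int :=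
  if microseconds ≠ 0 then
    let st := packtimeLoop microseconds 6 (0, 1000000, 1)
    (seconds * st.2.2 + PySem.Int.floordiv microseconds st.2.1, st.1)
  else (seconds, 0)

-- ===== PORT B =====
-- hand port of s.rstrip('0') (PySem's rstrip is the no-argument form): drop trailing '0' characters; exact
def rstripZeros (s : List Char) : List Char := (s.reverse.dropWhile (· == '0')).reverse

def packtime_py_alt (seconds : Int) (microseconds : Int) : Int × Int :=
  if microseconds = 0 then (seconds, 0)
  else
    let digits : List Char := PySem.Int.toChars |microseconds|   -- str(abs(microseconds))
    let z : Int := min 6 ((digits.length : Int) - ((rstripZeros digits).length : Int))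
    let ndiv : Int := 6 - z
    (seconds * (10:Int) ^ ndiv.toNat + PySem.Int.floordiv microseconds ((10:Int) ^ z.toNat), ndiv)

-- ===== PRECONDITION & SPEC =====
def Spec_packtime_py (seconds : Int) (microseconds : Int) (out : Int × Int) : Prop := out = packtime_py_alt seconds microseconds
instance (seconds : Int) (microseconds : Int) (out : Int × Int) : Decidable (Spec_packtime_py seconds microseconds out) := by unfold Spec_packtime_py; infer_instance

-- ===== CLAIM =====
def Claim_equal_packtime_py : Prop := ∀ (seconds : Int) (microseconds : Int), Dom_packtime_py seconds microseconds → Spec_packtime_py seconds microseconds (packtime_py seconds microseconds)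

-- ===== LEMMAS AND PROOFS =====

-- trailing-'0' count of a character list
def tzc (s : List Char) : Nat := (s.reverse.takeWhile (· == '0')).length

-- Nat.toDigitsCore with enough fuel appends to its accumulator
lemma toDigitsCore_acc (n : Nat) : ∀ (f : Nat) (acc : List Char), n < f →
    Nat.toDigitsCore 10 f n acc = Nat.toDigits 10 n ++ acc := by
  induction n using Nat.strong_induction_on with
  | _ n ih =>
    intro f acc h
    match f with
    | f + 1 =>
      by_cases h0 : n / 10 = 0
      · simp [Nat.toDigitsCore, Nat.toDigits, h0]
      · have hn : 0 < n := by
          rcases Nat.eq_zero_or_pos n with h' | h'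
          · exact absurd (by simp [h']) h0
          · exact h'
        have hlt : n / 10 < n := Nat.div_lt_self hn (by norm_num)
        have e1 : Nat.toDigitsCore 10 (f+1) n acc
            = Nat.toDigitsCore 10 f (n / 10) (Nat.digitChar (n % 10) :: acc) := by
          simp [Nat.toDigitsCore, h0]
        have e2 : Nat.toDigits 10 n
            = Nat.toDigitsCore 10 n (n / 10) [Nat.digitChar (n % 10)] := by
          simp [Nat.toDigits, Nat.toDigitsCore, h0]
        rw [e1, ih (n / 10) hlt f _ (by omega), e2, ih (n / 10) hlt n _ (by omega)]
        simp

-- the unfolding rule of Nat.toDigits 10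
lemma toDigits_ten (n : Nat) :
    Nat.toDigits 10 n = if n < 10 then [Nat.digitChar n]
      else Nat.toDigits 10 (n / 10) ++ [Nat.digitChar (n % 10)] := by
  by_cases h : n < 10
  · have h0 : n / 10 = 0 := Nat.div_eq_of_lt h
    simp [Nat.toDigits, Nat.toDigitsCore, h0, h, Nat.mod_eq_of_lt h]
  · have h0 : n / 10 ≠ 0 := by
      intro hc
      exact h (by omega)
    have e2 : Nat.toDigits 10 n
        = Nat.toDigitsCore 10 n (n / 10) [Nat.digitChar (n % 10)] := by
      simp [Nat.toDigits, Nat.toDigitsCore, h0]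
    rw [e2, toDigitsCore_acc (n / 10) n _ (Nat.div_lt_self (by omega) (by norm_num))]
    simp [h]

lemma digitChar_eq_zero_iff (d : Nat) (h : d < 10) : (Nat.digitChar d == '0') = decide (d = 0) := by
  interval_cases d <;> decide

-- tzc of a decimal representation follows the trailing digit
lemma tzc_toDigits (n : Nat) (hn : 0 < n) :
    tzc (Nat.toDigits 10 n) = if n % 10 = 0 then tzc (Nat.toDigits 10 (n / 10)) + 1 else 0 := by
  rw [toDigits_ten n]
  by_cases h : n < 10
  · have hm : n % 10 = n := Nat.mod_eq_of_lt h
    have hne : (Nat.digitChar n == '0') = false := by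
      rw [digitChar_eq_zero_iff n h]
      exact decide_eq_false (by omega)
    have hne0 : ¬ (n % 10 = 0) := by omega
    rw [if_pos h, if_neg hne0]
    simp [tzc, hne]
  · have hlt : n % 10 < 10 := Nat.mod_lt _ (by norm_num)
    simp only [if_neg h, tzc, List.reverse_append, List.reverse_cons, List.reverse_nil,
      List.nil_append, List.cons_append, List.takeWhile, digitChar_eq_zero_iff _ hlt]
    by_cases hz : n % 10 = 0 <;> simp [hz]

-- 10^k ∣ n together with ¬ 10^(k+1) ∣ n pins the trailing-zero count to k
lemma tzc_eq_of_dvd (k : Nat) : ∀ (n : Nat), 0 < n → 10 ^ k ∣ n → ¬ 10 ^ (k+1) ∣ n →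
    tzc (Nat.toDigits 10 n) = k := by
  induction k with
  | zero =>
    intro n hn _ hnd
    have hne : n % 10 ≠ 0 := by
      intro hc
      exact hnd (by simpa using (Nat.dvd_of_mod_eq_zero hc))
    rw [tzc_toDigits n hn, if_neg hne]
  | succ k ih =>
    intro n hn hd hnd
    have h10 : (10:Nat) ∣ n := dvd_trans (dvd_pow_self 10 (Nat.succ_ne_zero k)) hd
    have hm : n % 10 = 0 := by omega
    have hq : 0 < n / 10 := by omega
    have hd' : 10 ^ k ∣ n / 10 := by
      have h2 : 10 * 10 ^ k ∣ n := by
        rw [← pow_succ']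
        exact hd
      exact (Nat.dvd_div_iff_mul_dvd h10).mpr h2
    have hnd' : ¬ 10 ^ (k+1) ∣ n / 10 := by
      intro hc
      apply hnd
      have h2 : 10 * 10 ^ (k+1) ∣ n := (Nat.dvd_div_iff_mul_dvd h10).mp hc
      rw [← pow_succ'] at h2
      exact h2
    rw [tzc_toDigits n hn, if_pos hm, ih (n / 10) hq hd' hnd']

-- 10^k ∣ n forces at least k trailing zeros
lemma tzc_ge_of_dvd (k : Nat) : ∀ (n : Nat), 0 < n → 10 ^ k ∣ n →
    k ≤ tzc (Nat.toDigits 10 n) := by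
  induction k with
  | zero => intro n _ _; exact Nat.zero_le _
  | succ k ih =>
    intro n hn hd
    have h10 : (10:Nat) ∣ n := dvd_trans (dvd_pow_self 10 (Nat.succ_ne_zero k)) hd
    have hm : n % 10 = 0 := by omega
    have hq : 0 < n / 10 := by omega
    have hd' : 10 ^ k ∣ n / 10 := by
      have h2 : 10 * 10 ^ k ∣ n := by
        rw [← pow_succ']
        exact hd
      exact (Nat.dvd_div_iff_mul_dvd h10).mpr h2
    have := ih (n / 10) hq hd'
    rw [tzc_toDigits n hn, if_pos hm]
    omega

-- length difference after rstrip('0') is the trailing-zero count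
lemma len_sub_rstrip (s : List Char) :
    (s.length : Int) - ((rstripZeros s).length : Int) = (tzc s : Int) := by
  have h := congrArg List.length (List.takeWhile_append_dropWhile (p := (· == '0')) (l := s.reverse))
  rw [List.length_append, List.length_reverse] at h
  unfold rstripZeros tzc
  rw [List.length_reverse]
  omega

-- evaluation of B through the trailing-zero count
lemma alt_eval (s m : Int) (hm : m ≠ 0) :
    packtime_py_alt s m =
      (s * (10:Int) ^ ((6 - min 6 ((tzc (Nat.toDigits 10 m.natAbs) : Int))).toNat)
         + PySem.Int.floordiv m ((10:Int) ^ (min 6 ((tzc (Nat.toDigits 10 m.natAbs) : Int))).toNat),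
       6 - min 6 ((tzc (Nat.toDigits 10 m.natAbs) : Int))) := by
  have hd : PySem.Int.toChars |m| = Nat.toDigits 10 m.natAbs := by
    rw [Int.abs_eq_natAbs m]
    unfold PySem.Int.toChars
    rw [if_neg (not_lt.mpr (Int.natCast_nonneg m.natAbs)), Int.toNat_natCast]
  simp only [packtime_py_alt, if_neg hm, hd, len_sub_rstrip]

-- the two ports agree on every input
set_option maxRecDepth 4000 in
lemma packtime_eq (s m : Int) : packtime_py s m = packtime_py_alt s m := by
  by_cases hm : m = 0
  · simp [packtime_py, packtime_py_alt, hm]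
  · have hn : 0 < m.natAbs := Int.natAbs_pos.mpr hm
    have cast : ∀ c : Nat, ((c : Int) ∣ m) ↔ c ∣ m.natAbs := by
      intro c
      rw [← Int.natAbs_dvd_natAbs]
      simp
    rw [alt_eval s m hm]
    by_cases h6 : (1000000:Int) ∣ m
    · have h6' : 10 ^ 6 ∣ m.natAbs := by
        have := (cast 1000000).mp h6
        norm_num at this ⊢
        exact this
      have ht : 6 ≤ tzc (Nat.toDigits 10 m.natAbs) := tzc_ge_of_dvd 6 _ hn h6'
      have hz : min (6:Int) ((tzc (Nat.toDigits 10 m.natAbs) : Int)) = 6 := by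
        have : (6:Int) ≤ (tzc (Nat.toDigits 10 m.natAbs) : Int) := by exact_mod_cast ht
        omega
      rw [hz]
      simp [packtime_py, hm, packtimeLoop, h6]
      all_goals norm_num
    · have h6' : ¬ 10 ^ 6 ∣ m.natAbs := by
        intro hc
        apply h6
        rw [show ((1000000:Int)) = ((1000000:Nat) : Int) by norm_num, cast]
        norm_num at hc ⊢
        exact hc
      by_cases h5 : (100000:Int) ∣ m
      · have h5' : 10 ^ 5 ∣ m.natAbs := by
          have := (cast 100000).mp h5
          norm_num at this ⊢
          exact this
        have ht : tzc (Nat.toDigits 10 m.natAbs) = 5 := tzc_eq_of_dvd 5 _ hn h5' (by norm_num at h6' ⊢; exact h6')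
        rw [ht]
        simp [packtime_py, hm, packtimeLoop, h6, h5]
        all_goals norm_num
      · have h5' : ¬ 10 ^ 5 ∣ m.natAbs := by
          intro hc
          apply h5
          rw [show ((100000:Int)) = ((100000:Nat) : Int) by norm_num, cast]
          norm_num at hc ⊢
          exact hc
        by_cases h4 : (10000:Int) ∣ m
        · have h4' : 10 ^ 4 ∣ m.natAbs := by
            have := (cast 10000).mp h4
            norm_num at this ⊢
            exact this
          have ht : tzc (Nat.toDigits 10 m.natAbs) = 4 := tzc_eq_of_dvd 4 _ hn h4' (by norm_num at h5' ⊢; exact h5')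
          rw [ht]
          simp [packtime_py, hm, packtimeLoop, h6, h5, h4]
          all_goals norm_num
        · have h4' : ¬ 10 ^ 4 ∣ m.natAbs := by
            intro hc
            apply h4
            rw [show ((10000:Int)) = ((10000:Nat) : Int) by norm_num, cast]
            norm_num at hc ⊢
            exact hc
          by_cases h3 : (1000:Int) ∣ m
          · have h3' : 10 ^ 3 ∣ m.natAbs := by
              have := (cast 1000).mp h3
              norm_num at this ⊢
              exact this
            have ht : tzc (Nat.toDigits 10 m.natAbs) = 3 := tzc_eq_of_dvd 3 _ hn h3' (by norm_num at h4' ⊢; exact h4')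
            rw [ht]
            simp [packtime_py, hm, packtimeLoop, h6, h5, h4, h3]
            all_goals norm_num
          · have h3' : ¬ 10 ^ 3 ∣ m.natAbs := by
              intro hc
              apply h3
              rw [show ((1000:Int)) = ((1000:Nat) : Int) by norm_num, cast]
              norm_num at hc ⊢
              exact hc
            by_cases h2 : (100:Int) ∣ m
            · have h2' : 10 ^ 2 ∣ m.natAbs := by
                have := (cast 100).mp h2
                norm_num at this ⊢
                exact this
              have ht : tzc (Nat.toDigits 10 m.natAbs) = 2 := tzc_eq_of_dvd 2 _ hn h2' (by norm_num at h3' ⊢; exact h3')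
              rw [ht]
              simp [packtime_py, hm, packtimeLoop, h6, h5, h4, h3, h2]
              all_goals norm_num
            · have h2' : ¬ 10 ^ 2 ∣ m.natAbs := by
                intro hc
                apply h2
                rw [show ((100:Int)) = ((100:Nat) : Int) by norm_num, cast]
                norm_num at hc ⊢
                exact hc
              by_cases h1 : (10:Int) ∣ m
              · have h1' : 10 ^ 1 ∣ m.natAbs := by
                  have := (cast 10).mp h1
                  norm_num at this ⊢
                  exact this
                have ht : tzc (Nat.toDigits 10 m.natAbs) = 1 := tzc_eq_of_dvd 1 _ hn h1' (by norm_num at h2' ⊢; exact h2')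
                rw [ht]
                simp [packtime_py, hm, packtimeLoop, h6, h5, h4, h3, h2, h1]
                all_goals norm_num
              · have h1' : ¬ 10 ^ 1 ∣ m.natAbs := by
                  intro hc
                  apply h1
                  rw [show ((10:Int)) = ((10:Nat) : Int) by norm_num, cast]
                  norm_num at hc ⊢
                  exact hc
                have ht : tzc (Nat.toDigits 10 m.natAbs) = 0 := tzc_eq_of_dvd 0 _ hn (by norm_num) (by norm_num at h1' ⊢; exact h1')
                rw [ht]
                simp [packtime_py, hm, packtimeLoop, h6, h5, h4, h3, h2, h1]
                all_goals norm_num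

-- ===== VERDICT =====
theorem packtime_py_spec : Claim_equal_packtime_py := by
  intro s m _
  unfold Spec_packtime_py
  exact packtime_eq s m
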